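-- pv_equiv track=rewrite | github.com/cuzic/ai-dev-yodoq | slides/recommend_layout.py | is_two_list_structure
-- ===== SOURCE A (Python) =====
-- def is_two_list_structure(content: str) -> bool:
--     """2つのリスト構造かチェック"""
--     # 連続する箇条書きブロックが2つあるか
--     lines = content.split('\n')
--     list_blocks = 0
--     in_list = False
--
--     for line in lines:
--         if line.strip().startswith(('-', '*', '1.', '2.', '3.', '4.', '5.')):
--             if not in_list:
--                 list_blocks += 1
--                 in_list = True
--         elif not line.strip():
--             in_list = False
--
--     return list_blocks >= 2
-- ===== SOURCE B (Python) =====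
-- BULLETS = ('-', '*', '1.', '2.', '3.', '4.', '5.')
--
--
-- def is_two_list_structure(content: str) -> bool:
--     """Group lines into blank-separated segments, then count segments
--     that contain at least one bullet line."""
--     segments = []
--     current = []
--     for line in content.split('\n'):
--         if line.strip():
--             current.append(line)
--         else:
--             segments.append(current)
--             current = []
--     segments.append(current)
--     count = sum(1 for seg in segments
--                 if any(l.strip().startswith(BULLETS) for l in seg))
--     return count >= 2
-- ===== Notes on version B (the rewrite author's own statement) =====
-- stated objective: alternative
-- what changed: Replaces the running in_list state machine with an explicit group-then-test structure: split the lines into blank-separated segments first, then count the segments containing a bullet line.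
import Mathlib
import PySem

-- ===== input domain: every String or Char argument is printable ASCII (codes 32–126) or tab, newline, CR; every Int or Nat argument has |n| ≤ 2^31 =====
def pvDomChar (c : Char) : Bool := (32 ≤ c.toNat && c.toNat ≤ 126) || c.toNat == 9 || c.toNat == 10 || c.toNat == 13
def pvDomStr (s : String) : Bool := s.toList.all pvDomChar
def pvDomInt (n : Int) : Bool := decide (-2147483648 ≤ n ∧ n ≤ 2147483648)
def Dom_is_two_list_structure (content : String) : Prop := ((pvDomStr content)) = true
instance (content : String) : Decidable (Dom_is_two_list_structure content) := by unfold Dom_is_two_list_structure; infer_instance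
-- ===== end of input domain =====

-- B replaces A's running in_list state machine by an explicit group-then-test
-- decomposition (blank-separated segments, count those with a bullet line); same cost.

-- line.strip().startswith(('-', '*', '1.', '2.', '3.', '4.', '5.'))
def pvIsBullet (line : String) : Bool :=
  let s := PySem.Str.strip line
  PySem.Str.startswith s "-" || PySem.Str.startswith s "*" ||
  PySem.Str.startswith s "1." || PySem.Str.startswith s "2." ||
  PySem.Str.startswith s "3." || PySem.Str.startswith s "4." ||
  PySem.Str.startswith s "5."

-- not line.strip()
def pvBlank (line : String) : Bool := PySem.Str.strip line == ""

-- ===== PORT A =====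
def pvStepA (st : Int × Bool) (line : String) : Int × Bool :=
  if pvIsBullet line then
    (if st.2 = false then (st.1 + 1, true) else st)
  else if pvBlank line then (st.1, false)
  else st

-- content.split('\n'): sep "\n" is non-empty, so split? is always some; getD [] never fires
def is_two_list_structure (content : String) : Bool :=
  let lines := (PySem.Str.split? content "\n").getD []
  let st := lines.foldl pvStepA (0, false)
  decide (2 ≤ st.1)

-- ===== PORT B =====
-- the segment-building loop of Source B: accumulate non-blank lines, flush on blank,
-- flush the final segment at the end (current is accumulated reversed)
def pvSegs : List String → List String → List (List String)
  | cur, [] => [cur.reverse]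
  | cur, l :: ls => if pvBlank l then cur.reverse :: pvSegs [] ls else pvSegs (l :: cur) ls

def is_two_list_structure_alt (content : String) : Bool :=
  let segments := pvSegs [] ((PySem.Str.split? content "\n").getD [])
  let count : Int := segments.countP (fun seg => seg.any pvIsBullet)
  decide (2 ≤ count)

-- ===== PRECONDITION & SPEC =====
def Spec_is_two_list_structure (content : String) (out : Bool) : Prop := out = is_two_list_structure_alt content
instance (content : String) (out : Bool) : Decidable (Spec_is_two_list_structure content out) := by unfold Spec_is_two_list_structure; infer_instance

-- ===== CLAIM (what is proved, stated in full; the proofs are below) =====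
def Claim_equal_is_two_list_structure : Prop := ∀ (content : String), Dom_is_two_list_structure content → Spec_is_two_list_structure content (is_two_list_structure content)

-- ===== LEMMAS AND PROOFS =====

def pvCnt (segs : List (List String)) : Int := segs.countP (fun seg => seg.any pvIsBullet)

-- a bullet line is not blank (every bullet prefix is nonempty)
theorem pvBullet_not_blank (l : String) (h : pvIsBullet l = true) : pvBlank l = false := by
  cases hb : (PySem.Str.strip l == "") with
  | false => unfold pvBlank; exact hb
  | true =>
    exfalso
    have hs : PySem.Str.strip l = "" := eq_of_beq hb
    unfold pvIsBullet at h
    rw [hs] at h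
    revert h; decide

theorem pvCnt_cons (x : List String) (s : List (List String)) :
    pvCnt (x :: s) = (if x.any pvIsBullet then 1 else 0) + pvCnt s := by
  by_cases h : x.any pvIsBullet = true <;> simp [pvCnt, h] <;> omega

theorem pvLoop_eq (ls : List String) : ∀ (cur : List String) (b : Int) (inl : Bool),
    inl = cur.any pvIsBullet →
    (ls.foldl pvStepA (b, inl)).1 = b + pvCnt (pvSegs cur ls) - (if inl then 1 else 0) := by
  induction ls with
  | nil =>
    intro cur b inl h
    simp only [List.foldl_nil, pvSegs, pvCnt, List.countP_cons, List.countP_nil, List.any_reverse, ← h]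
    cases inl <;> simp
  | cons l ls ih =>
    intro cur b inl h
    by_cases hb : pvIsBullet l = true
    · have hnb := pvBullet_not_blank l hb
      have hcur : (l :: cur).any pvIsBullet = true := by simp [hb]
      cases inl with
      | false =>
        have := ih (l :: cur) (b + 1) true hcur.symm
        simp only [List.foldl_cons, pvStepA, hb, if_true] at *
        simp only [pvSegs, hnb, Bool.false_eq_true, if_false]
        simp at this ⊢
        omega
      | true =>
        have := ih (l :: cur) b true hcur.symm
        simp only [List.foldl_cons, pvStepA, hb, if_true] at *
        simp only [pvSegs, hnb, Bool.false_eq_true, if_false]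
        simp at this ⊢
        omega
    · have hb' : pvIsBullet l = false := by simpa using hb
      by_cases hblank : pvBlank l = true
      · have := ih [] b false rfl
        simp only [List.foldl_cons, pvStepA, hb', Bool.false_eq_true, if_false, hblank, if_true]
        simp only [pvSegs, hblank, if_true, pvCnt_cons, List.any_reverse, ← h]
        simp at this ⊢
        cases inl <;> simp <;> omega
      · have hblank' : pvBlank l = false := by simpa using hblank
        have hcur : (l :: cur).any pvIsBullet = inl := by simp [hb', ← h]
        have := ih (l :: cur) b inl hcur.symm
        simp only [List.foldl_cons, pvStepA, hb', Bool.false_eq_true, if_false, hblank', if_false]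
        simp only [pvSegs, hblank', Bool.false_eq_true, if_false]
        exact this

-- ===== VERDICT (by name: the statement is the Claim_ definition above) =====
theorem is_two_list_structure_spec : Claim_equal_is_two_list_structure := by
  intro content _
  unfold Spec_is_two_list_structure is_two_list_structure is_two_list_structure_alt
  have := pvLoop_eq ((PySem.Str.split? content "\n").getD []) [] 0 false rfl
  simp only [this, pvCnt]
  norm_num
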